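-- pv_equiv track=rewrite | github.com/samagids/awing-ai-learning | scripts/generate_audio_espeak.py | _syllabify_phonemes
-- ===== SOURCE A (Python) =====
-- def _syllabify_phonemes(phoneme_str):
--     """Split a phoneme string into syllables with tone information.
--
--     Each syllable is (phonemes, tone_number) where tone_number is "1"-"5"
--     or "0" for untoned (consonant-only fragments).
--
--     The phoneme string from awing_to_phonemes() has space-separated tokens.
--     Tokens starting with a digit 1-5 are toned vowels (e.g., "1a", "3E:").
--     Other tokens are consonants or word boundaries.
--     """
--     tokens = phoneme_str.split()
--     syllables = []
--     current_consonants = []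
--
--     for token in tokens:
--         if not token:
--             # Word boundary
--             if current_consonants:
--                 syllables.append((" ".join(current_consonants), "0"))
--                 current_consonants = []
--             syllables.append(("", "0"))  # pause
--             continue
--
--         # Check if this token starts with a tone number (1-5)
--         if token and token[0] in "12345":
--             tone = token[0]
--             vowel_ph = token[1:]
--             # Combine preceding consonants + this vowel into a syllable
--             parts = current_consonants + [vowel_ph] if vowel_ph else current_consonants
--             current_consonants = []
--             syllables.append((" ".join(parts), tone))
--         else:
--             # Consonant or other — accumulate
--             current_consonants.append(token)
--
--     # Leftover consonants (e.g., final nasal)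
--     if current_consonants:
--         syllables.append((" ".join(current_consonants), "0"))
--
--     return syllables
-- ===== SOURCE B (Python) =====
-- def _syllabify_phonemes(phoneme_str):
--     """Split a phoneme string into (phonemes, tone) syllables.
--
--     Recursive span decomposition: peel off the run of untoned tokens
--     before the next toned token, emit one syllable, recurse on the rest;
--     a trailing untoned run becomes a tone-"0" syllable.
--     """
--     def go(ts):
--         # span: pre = untoned prefix, rest = from the first toned token on
--         pre = []
--         rest = ts
--         while rest and rest[0][0] not in "12345":
--             pre.append(rest[0])
--             rest = rest[1:]
--         if not rest:
--             return [(" ".join(ts), "0")] if ts else []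
--         t = rest[0]
--         parts = pre + [t[1:]] if t[1:] else pre
--         return [(" ".join(parts), t[0])] + go(rest[1:])
--
--     return go(phoneme_str.split())
-- ===== Notes on version B (the rewrite author's own statement) =====
-- stated objective: alternative
-- what changed: Replaces A's single accumulate-and-flush loop carrying a mutable consonant buffer by a recursive span decomposition: each step splits the token list at the first toned token, emits one syllable from that span, and recurses on the remainder.
import Mathlib
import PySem

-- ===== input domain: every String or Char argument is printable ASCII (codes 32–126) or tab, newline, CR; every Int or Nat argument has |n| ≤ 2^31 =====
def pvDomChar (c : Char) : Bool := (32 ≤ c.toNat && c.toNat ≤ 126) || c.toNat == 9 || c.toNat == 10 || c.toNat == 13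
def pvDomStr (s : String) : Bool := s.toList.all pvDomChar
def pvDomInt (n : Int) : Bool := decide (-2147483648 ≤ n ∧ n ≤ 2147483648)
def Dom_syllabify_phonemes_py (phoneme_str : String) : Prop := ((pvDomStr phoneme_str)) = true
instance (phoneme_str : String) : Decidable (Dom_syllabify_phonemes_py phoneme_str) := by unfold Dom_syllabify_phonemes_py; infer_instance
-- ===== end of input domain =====

-- B replaces A's accumulate-and-flush loop by a recursive span decomposition (alternative, same cost).
-- Tokens are handled as List Char; strings are built only via String.ofList / pvJoinSp.

-- shared token predicate: Python's `token and token[0] in "12345"` (both sources test exactly this)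
def pvToned (token : List Char) : Bool :=
  match token with
  | [] => false
  | c :: _ => c = '1' || c = '2' || c = '3' || c = '4' || c = '5'

-- " ".join(parts)
def pvJoinSp (parts : List (List Char)) : String :=
  String.ofList (PySem.Chars.join [' '] parts)

-- ===== PORT A =====
-- loop body of A: state = (syllables, current_consonants)
def pvAStep (st : List (String × String) × List (List Char)) (token : List Char) :
    List (String × String) × List (List Char) :=
  let syllables := st.1
  let cc := st.2
  if token = [] then
    -- word boundary (unreachable for split() tokens, kept from A's source)
    ((if cc ≠ [] then syllables ++ [(pvJoinSp cc, "0")] else syllables) ++ [("", "0")], [])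
  else if pvToned token then
    -- tone = token[0]; vowel_ph = token[1:]  (token ≠ [] under the guard)
    let tone := String.ofList [token.headD ' ']
    let vowel_ph := token.tail
    let parts := if vowel_ph ≠ [] then cc ++ [vowel_ph] else cc
    (syllables ++ [(pvJoinSp parts, tone)], [])
  else
    (syllables, cc ++ [token])

def syllabify_phonemes_py (phoneme_str : String) : List (String × String) :=
  let tokens := PySem.Chars.split₀ phoneme_str.toList
  let st := tokens.foldl pvAStep ([], [])
  if st.2 ≠ [] then st.1 ++ [(pvJoinSp st.2, "0")] else st.1

-- ===== PORT B =====
-- span + recurse: pre = untoned prefix, rest = from the first toned token on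
def pvGo (ts : List (List Char)) : List (String × String) :=
  match h : ts.dropWhile (fun t => !pvToned t) with
  | [] => if ts = [] then [] else [(pvJoinSp ts, "0")]
  | t :: rest =>
      let pre := ts.takeWhile (fun t => !pvToned t)
      let parts := if t.tail ≠ [] then pre ++ [t.tail] else pre
      (pvJoinSp parts, String.ofList [t.headD ' ']) :: pvGo rest
termination_by ts.length
decreasing_by
  have h1 : (ts.dropWhile (fun t => !pvToned t)).length ≤ ts.length :=
    ts.length_dropWhile_le _
  rw [h] at h1
  simpa using Nat.lt_of_lt_of_le (Nat.lt_succ_self _) h1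

def syllabify_phonemes_py_alt (phoneme_str : String) : List (String × String) :=
  pvGo (PySem.Chars.split₀ phoneme_str.toList)

-- ===== PRECONDITION & SPEC =====
def Spec_syllabify_phonemes_py (phoneme_str : String) (out : List (String × String)) : Prop := out = syllabify_phonemes_py_alt phoneme_str
instance (phoneme_str : String) (out : List (String × String)) : Decidable (Spec_syllabify_phonemes_py phoneme_str out) := by unfold Spec_syllabify_phonemes_py; infer_instance

-- ===== CLAIM (what is proved, stated in full; the proofs are below) =====
def Claim_equal_syllabify_phonemes_py : Prop := ∀ (phoneme_str : String), Dom_syllabify_phonemes_py phoneme_str → Spec_syllabify_phonemes_py phoneme_str (syllabify_phonemes_py phoneme_str)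

-- ===== LEMMAS AND PROOFS =====

-- tokens produced by str.split() are nonempty
theorem split₀_go_ne_nil (s : List Char) : ∀ (cur : List Char) (acc : List (List Char)),
    (∀ t ∈ acc, t ≠ []) → ∀ t ∈ PySem.Chars.split₀.go s cur acc, t ≠ [] := by
  induction s with
  | nil =>
    intro cur acc hacc t ht
    simp only [PySem.Chars.split₀.go] at ht
    split at ht
    · exact hacc t (List.mem_reverse.mp ht)
    · rename_i hcur
      rcases List.mem_cons.mp (List.mem_reverse.mp ht) with hh | hh
      · subst hh
        simp [List.isEmpty_iff] at hcur
        simpa using hcur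
      · exact hacc t hh
  | cons c rest ih =>
    intro cur acc hacc t ht
    simp only [PySem.Chars.split₀.go] at ht
    split at ht
    · split at ht
      · exact ih [] acc hacc t ht
      · rename_i hcur
        refine ih [] (cur.reverse :: acc) ?_ t ht
        intro u hu
        rcases List.mem_cons.mp hu with hh | hh
        · subst hh
          simp [List.isEmpty_iff] at hcur
          simpa using hcur
        · exact hacc u hh
    · exact ih (c :: cur) acc hacc t ht

theorem split₀_ne_nil (s : List Char) : ∀ t ∈ PySem.Chars.split₀ s, t ≠ [] := by
  have := split₀_go_ne_nil s [] [] (by simp)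
  simpa [PySem.Chars.split₀] using this

-- span of an untoned prefix followed by a toned token
theorem span_untoned_toned (t : List Char) (ts : List (List Char)) (ht : pvToned t = true) :
    ∀ (cc : List (List Char)), (∀ u ∈ cc, pvToned u = false) →
    (cc ++ t :: ts).dropWhile (fun u => !pvToned u) = t :: ts ∧
    (cc ++ t :: ts).takeWhile (fun u => !pvToned u) = cc := by
  intro cc
  induction cc with
  | nil => intro _; simp [ht]
  | cons x xs ih =>
    intro hcc
    have hx : pvToned x = false := hcc x (by simp)
    have hxs := ih (fun u hu => hcc u (by simp [hu]))
    simp only [List.cons_append, List.dropWhile_cons, List.takeWhile_cons, hx]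
    simp [hxs.1, hxs.2]

-- pvGo on a fully-untoned list
theorem pvGo_untoned (cc : List (List Char)) (hcc : ∀ t ∈ cc, pvToned t = false) :
    pvGo cc = if cc ≠ [] then [(pvJoinSp cc, "0")] else [] := by
  have hd : cc.dropWhile (fun t => !pvToned t) = [] := by
    apply List.dropWhile_eq_nil_iff.mpr
    intro x hx; simp [hcc x hx]
  rw [pvGo]
  split
  · split_ifs with h <;> simp_all
  · rename_i t rest heq
    rw [hd] at heq; exact absurd heq (by simp)

-- pvGo where the prefix cc is untoned and the next token t is toned
theorem pvGo_cons_toned (cc : List (List Char)) (t : List Char) (ts : List (List Char))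
    (hcc : ∀ u ∈ cc, pvToned u = false) (ht : pvToned t = true) :
    pvGo (cc ++ t :: ts) =
      (pvJoinSp (if t.tail ≠ [] then cc ++ [t.tail] else cc),
        String.ofList [t.headD ' ']) :: pvGo ts := by
  obtain ⟨hdrop, htake⟩ := span_untoned_toned t ts ht cc hcc
  rw [pvGo]
  split
  · rename_i heq; rw [hdrop] at heq; exact absurd heq (by simp)
  · rename_i u rest heq
    rw [hdrop] at heq
    cases heq
    simp [htake]

-- main loop invariant: A's fold from state (syl, cc) equals syl ++ pvGo (cc ++ ts)
theorem loop_eq (ts : List (List Char)) : ∀ (syl : List (String × String)) (cc : List (List Char)),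
    (∀ t ∈ ts, t ≠ []) → (∀ t ∈ cc, pvToned t = false) →
    (let st := ts.foldl pvAStep (syl, cc)
     if st.2 ≠ [] then st.1 ++ [(pvJoinSp st.2, "0")] else st.1) = syl ++ pvGo (cc ++ ts) := by
  induction ts with
  | nil =>
    intro syl cc _ hcc
    simp only [List.foldl_nil, List.append_nil]
    rw [pvGo_untoned cc hcc]
    split_ifs <;> simp
  | cons t ts ih =>
    intro syl cc hts hcc
    have htne : t ≠ [] := hts t (by simp)
    simp only [List.foldl_cons]
    by_cases htoned : pvToned t = true
    · have hstep : pvAStep (syl, cc) t =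
        (syl ++ [(pvJoinSp (if t.tail ≠ [] then cc ++ [t.tail] else cc),
          String.ofList [t.headD ' '])], []) := by
        simp [pvAStep, htne, htoned]
      rw [hstep, ih _ [] (fun u hu => hts u (by simp [hu])) (by simp),
        pvGo_cons_toned cc t ts hcc htoned]
      simp
    · have hstep : pvAStep (syl, cc) t = (syl, cc ++ [t]) := by
        simp [pvAStep, htne, htoned]
      rw [hstep, ih syl (cc ++ [t]) (fun u hu => hts u (by simp [hu]))
        (by intro u hu; rcases List.mem_append.mp hu with h | h
            · exact hcc u h
            · simp at h; subst h; simpa using htoned)]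
      simp

-- ===== VERDICT (by name: the statement is the Claim_ definition above) =====
theorem syllabify_phonemes_py_spec : Claim_equal_syllabify_phonemes_py := by
  intro phoneme_str _
  unfold Spec_syllabify_phonemes_py syllabify_phonemes_py syllabify_phonemes_py_alt
  have := loop_eq (PySem.Chars.split₀ phoneme_str.toList) [] []
    (split₀_ne_nil phoneme_str.toList) (by simp)
  simpa using this
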